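-- pv_equiv track=rewrite | github.com/ncsu-landscape-dynamics/pathways-simulation | pathways/shipments.py | _infested_boxes_to_cluster_sizes
-- ===== SOURCE A (Python) =====
-- def _infested_boxes_to_cluster_sizes(infested_boxes, max_boxes_per_cluster):
--     """Get list of cluster sizes for a given number of infested stems
--
--     The size of each cluster is limited by max_infested_stems_per_cluster.
--     """
--     if infested_boxes > max_boxes_per_cluster:
--         # Split into n clusters so that n-1 clusters have the max size and
--         # the last one has the remaining stems.
--         sum_boxes = 0
--         cluster_sizes = []
--         while sum_boxes < infested_boxes - max_boxes_per_cluster: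
--             sum_boxes += max_boxes_per_cluster
--             cluster_sizes.append(max_boxes_per_cluster)
--         # add remaining boxes
--         cluster_sizes.append(infested_boxes - sum_boxes)
--         sum_boxes += infested_boxes - sum_boxes
--         assert sum_boxes == infested_boxes
--     else:
--         cluster_sizes = [infested_boxes]
--     return cluster_sizes
-- ===== SOURCE B (Python) =====
-- def _infested_boxes_to_cluster_sizes(infested_boxes, max_boxes_per_cluster):
--     """Get list of cluster sizes for a given number of infested stems
--
--     The size of each cluster is limited by max_infested_stems_per_cluster.
--     """
--     if infested_boxes > max_boxes_per_cluster:
--         full_count = (infested_boxes - 1) // max_boxes_per_cluster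
--         remainder = infested_boxes - max_boxes_per_cluster * full_count
--         return [max_boxes_per_cluster] * full_count + [remainder]
--     return [infested_boxes]
-- ===== Notes on version B (the rewrite author's own statement) =====
-- stated objective: simpler
-- what changed: Replaces the accumulating while-loop with a closed-form count of full clusters ((n-1)//m) and list replication.
import Mathlib
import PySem

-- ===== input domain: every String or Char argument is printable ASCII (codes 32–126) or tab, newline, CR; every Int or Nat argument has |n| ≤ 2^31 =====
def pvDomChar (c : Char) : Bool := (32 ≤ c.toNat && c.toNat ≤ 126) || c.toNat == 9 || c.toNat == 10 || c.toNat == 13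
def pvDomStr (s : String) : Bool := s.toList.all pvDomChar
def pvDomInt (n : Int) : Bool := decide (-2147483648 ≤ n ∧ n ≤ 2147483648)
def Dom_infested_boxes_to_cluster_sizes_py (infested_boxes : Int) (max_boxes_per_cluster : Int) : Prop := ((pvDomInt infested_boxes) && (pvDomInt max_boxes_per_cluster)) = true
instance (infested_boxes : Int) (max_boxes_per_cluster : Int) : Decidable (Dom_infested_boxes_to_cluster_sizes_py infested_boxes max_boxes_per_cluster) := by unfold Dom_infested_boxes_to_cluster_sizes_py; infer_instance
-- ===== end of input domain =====

-- B replaces A's accumulating while-loop with a closed-form count of full clusters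
-- ((n-1)//m) plus list replication; same return value wherever A terminates.


-- ===== PORT A =====
-- Python while-loop: 'while sum_boxes < infested - max: sum_boxes += max; cluster_sizes.append(max)'.
-- Fuel only makes the recursion total; under Pre_ (0 < max) the fuel infested.toNat + 1 is never exhausted.
def pvLoopA (m target : Int) : Nat → Int → List Int → (Int × List Int)
  | 0, s, acc => (s, acc)
  | fuel + 1, s, acc =>
      if s < target then pvLoopA m target fuel (s + m) (acc ++ [m]) else (s, acc)

def infested_boxes_to_cluster_sizes_py (infested_boxes : Int) (max_boxes_per_cluster : Int) : List Int :=
  if infested_boxes > max_boxes_per_cluster then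
    let r := pvLoopA max_boxes_per_cluster (infested_boxes - max_boxes_per_cluster)
               (infested_boxes.toNat + 1) 0 []
    -- cluster_sizes.append(infested_boxes - sum_boxes)
    r.2 ++ [infested_boxes - r.1]
  else
    [infested_boxes]

-- ===== PORT B =====
def infested_boxes_to_cluster_sizes_py_alt (infested_boxes : Int) (max_boxes_per_cluster : Int) : List Int :=
  if infested_boxes > max_boxes_per_cluster then
    let full_count := PySem.Int.floordiv (infested_boxes - 1) max_boxes_per_cluster
    let remainder := infested_boxes - max_boxes_per_cluster * full_count
    List.replicate full_count.toNat max_boxes_per_cluster ++ [remainder]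
  else
    [infested_boxes]

-- ===== PRECONDITION & SPEC =====
-- Pre_ excludes exactly the inputs where Python A never returns: with infested_boxes >
-- max_boxes_per_cluster and max_boxes_per_cluster ≤ 0 the while-loop runs forever.
def Pre_infested_boxes_to_cluster_sizes_py (infested_boxes : Int) (max_boxes_per_cluster : Int) : Prop :=
  infested_boxes ≤ max_boxes_per_cluster ∨ 0 < max_boxes_per_cluster
instance (infested_boxes : Int) (max_boxes_per_cluster : Int) : Decidable (Pre_infested_boxes_to_cluster_sizes_py infested_boxes max_boxes_per_cluster) := by unfold Pre_infested_boxes_to_cluster_sizes_py; infer_instance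

def pvWitness_infested_boxes_to_cluster_sizes_py : Int × Int := (11, 4)

def Spec_infested_boxes_to_cluster_sizes_py (infested_boxes : Int) (max_boxes_per_cluster : Int) (out : List Int) : Prop := out = infested_boxes_to_cluster_sizes_py_alt infested_boxes max_boxes_per_cluster
instance (infested_boxes : Int) (max_boxes_per_cluster : Int) (out : List Int) : Decidable (Spec_infested_boxes_to_cluster_sizes_py infested_boxes max_boxes_per_cluster out) := by unfold Spec_infested_boxes_to_cluster_sizes_py; infer_instance

-- ===== CLAIM =====
def Claim_equal_infested_boxes_to_cluster_sizes_py : Prop := ∀ (infested_boxes : Int) (max_boxes_per_cluster : Int), Dom_infested_boxes_to_cluster_sizes_py infested_boxes max_boxes_per_cluster → Pre_infested_boxes_to_cluster_sizes_py infested_boxes max_boxes_per_cluster → Spec_infested_boxes_to_cluster_sizes_py infested_boxes max_boxes_per_cluster (infested_boxes_to_cluster_sizes_py infested_boxes max_boxes_per_cluster)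

-- ===== LEMMAS AND PROOFS =====

-- Steps performed by the loop from state s: smallest k with target ≤ s + k*m (as an Int via ceiling division).
def pvCnt (m target s : Int) : Int := PySem.Int.floordiv (target - s + m - 1) m

lemma pvCnt_nonpos_of_le (m target s : Int) (hm : 0 < m) (h : target ≤ s) :
    pvCnt m target s ≤ 0 := by
  have := (PySem.Int.floordiv_lt_iff_lt_mul (a := target - s + m - 1) (b := m) (q := 1) hm).mpr (by omega)
  unfold pvCnt; omega

lemma pvCnt_pos_of_lt (m target s : Int) (hm : 0 < m) (h : s < target) :
    0 < pvCnt m target s := by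
  have := (PySem.Int.le_floordiv_iff_mul_le (a := target - s + m - 1) (b := m) (q := 1) hm).mpr (by omega)
  unfold pvCnt; omega

lemma pvCnt_step (m target s : Int) (hm : 0 < m) :
    pvCnt m target s = pvCnt m target (s + m) + 1 := by
  unfold pvCnt
  rw [PySem.Int.floordiv_eq_ediv_of_pos hm, PySem.Int.floordiv_eq_ediv_of_pos hm]
  have hx : target - s + m - 1 = (target - (s + m) + m - 1) + 1 * m := by ring
  rw [hx, Int.add_mul_ediv_right _ _ (by omega : m ≠ 0)]

lemma pvLoopA_spec (m target : Int) (hm : 0 < m) :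
    ∀ (fuel : Nat) (s : Int) (acc : List Int), target ≤ s + fuel * m →
      pvLoopA m target fuel s acc =
        (s + m * (pvCnt m target s).toNat, acc ++ List.replicate (pvCnt m target s).toNat m) := by
  intro fuel
  induction fuel with
  | zero =>
      intro s acc h
      simp only [pvLoopA]
      have hc := pvCnt_nonpos_of_le m target s hm (by push_cast at h; omega)
      have h0 : (pvCnt m target s).toNat = 0 := by omega
      simp [h0]
  | succ n ih =>
      intro s acc h
      simp only [pvLoopA]
      by_cases hs : s < target
      · rw [if_pos hs]
        rw [ih (s + m) (acc ++ [m]) (by push_cast at h ⊢; linarith)]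
        have hstep := pvCnt_step m target s hm
        have hpos := pvCnt_pos_of_lt m target s hm hs
        have htn : (pvCnt m target s).toNat = (pvCnt m target (s + m)).toNat + 1 := by omega
        rw [htn]
        simp only [Prod.mk.injEq]
        refine ⟨by push_cast; ring, ?_⟩
        rw [List.append_assoc]
        rfl
      · rw [if_neg hs]
        have hc := pvCnt_nonpos_of_le m target s hm (by omega)
        have h0 : (pvCnt m target s).toNat = 0 := by omega
        simp [h0]

-- ===== VERDICT =====
theorem infested_boxes_to_cluster_sizes_py_spec : Claim_equal_infested_boxes_to_cluster_sizes_py := by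
  intro n m _ hpre
  unfold Spec_infested_boxes_to_cluster_sizes_py
  unfold infested_boxes_to_cluster_sizes_py infested_boxes_to_cluster_sizes_py_alt
  by_cases hgt : n > m
  · have hm : 0 < m := by
      rcases hpre with h | h
      · omega
      · exact h
    rw [if_pos hgt, if_pos hgt]
    have hfuel : n - m ≤ (0 : Int) + ((n.toNat : Nat) + 1 : Nat) * m := by
      have hn : ((n.toNat : Nat) : Int) = n := by omega
      push_cast
      nlinarith
    rw [pvLoopA_spec m (n - m) hm (n.toNat + 1) 0 [] hfuel]
    have hcnt : pvCnt m (n - m) 0 = PySem.Int.floordiv (n - 1) m := by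
      unfold pvCnt
      have : n - m - 0 + m - 1 = n - 1 := by ring
      rw [this]
    have hfnn : 0 ≤ PySem.Int.floordiv (n - 1) m :=
      (PySem.Int.le_floordiv_iff_mul_le (a := n - 1) (b := m) (q := 0) hm).mpr (by omega)
    have hcast : ((PySem.Int.floordiv (n - 1) m).toNat : Int) = PySem.Int.floordiv (n - 1) m := by
      omega
    simp only [List.nil_append, hcnt, zero_add, hcast]
  · rw [if_neg hgt, if_neg hgt]
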